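-- pv_equiv track=rewrite | github.com/techlearnpoornima-code/animation-vedio-generator | agents/voiceover_agent.py | _assign_kokoro
-- ===== SOURCE A (Python) =====
-- KOKORO_VOICES = [
--     # American female
--     ("af_bella",    "female", "a", "American female – warm, clear"),
--     ("af_nicole",   "female", "a", "American female – smooth, professional"),
--     ("af_sarah",    "female", "a", "American female – friendly, bright"),
--     ("af_sky",      "female", "a", "American female – airy, youthful"),
--     # American male
--     ("am_adam",     "male",   "a", "American male – deep, authoritative"),
--     ("am_michael",  "male",   "a", "American male – neutral, newscaster"),
--     # British female
--     ("bf_emma",     "female", "b", "British female – refined, articulate"),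
--     ("bf_isabella", "female", "b", "British female – warm, storyteller"),
--     # British male
--     ("bm_george",   "male",   "b", "British male – distinguished, mature"),
--     ("bm_lewis",    "male",   "b", "British male – energetic, contemporary"),
--     # Neutral fallback
--     ("af",          "female", "a", "American female – default"),
-- ]
--
-- KOKORO_FEMALE = [v for v in KOKORO_VOICES if v[1] == "female"]
--
-- KOKORO_MALE   = [v for v in KOKORO_VOICES if v[1] == "male"]
--
-- KOKORO_PREF = {
--     ("female", "confident"):    0,   # af_bella
--     ("female", "warm"):         0,   # af_bella
--     ("female", "enthusiastic"): 2,   # af_sarah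
--     ("female", "nervous"):      3,   # af_sky
--     ("female", "deadpan"):      1,   # af_nicole
--     ("female", "sinister"):     4,   # bf_emma
--     ("female", "raspy"):        5,   # bf_isabella
--     ("male",   "confident"):    0,   # am_adam
--     ("male",   "warm"):         0,   # am_adam
--     ("male",   "enthusiastic"): 1,   # am_michael
--     ("male",   "deadpan"):      1,   # am_michael
--     ("male",   "nervous"):      1,   # am_michael
--     ("male",   "sinister"):     2,   # bm_george
--     ("male",   "raspy"):        2,   # bm_george
-- }
--
-- def _assign_kokoro(gender: str, energy: str, used: set[str]) -> dict:
--     """Pick the best available Kokoro voice for this gender/energy combo."""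
--     if gender == "male":
--         pool = KOKORO_MALE
--     elif gender == "female":
--         pool = KOKORO_FEMALE
--     else:
--         pool = KOKORO_VOICES  # neutral: all voices
--
--     preferred_idx = KOKORO_PREF.get((gender, energy), 0)
--
--     # Try preferred first, then walk through pool, then entire catalogue
--     order = [preferred_idx] + [i for i in range(len(pool)) if i != preferred_idx]
--     for idx in order:
--         voice_id = pool[idx % len(pool)][0]
--         if voice_id not in used:
--             entry = pool[idx % len(pool)]
--             return {
--                 "type":      "kokoro",
--                 "voice_id":  entry[0],
--                 "lang_code": entry[2],
--                 "description": entry[3],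
--             }
--
--     # All gender-specific voices taken — fall through to full catalogue
--     for entry in KOKORO_VOICES:
--         if entry[0] not in used:
--             return {
--                 "type":      "kokoro",
--                 "voice_id":  entry[0],
--                 "lang_code": entry[2],
--                 "description": entry[3],
--             }
--
--     # Absolute last resort: reuse first voice (should never happen with <11 chars)
--     entry = KOKORO_VOICES[0]
--     return {
--         "type":        "kokoro",
--         "voice_id":    entry[0],
--         "lang_code":   entry[2],
--         "description": entry[3],
--     }
-- ===== SOURCE B (Python) =====
-- KOKORO_VOICES = [
--     ("af_bella",    "female", "a", "American female – warm, clear"),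
--     ("af_nicole",   "female", "a", "American female – smooth, professional"),
--     ("af_sarah",    "female", "a", "American female – friendly, bright"),
--     ("af_sky",      "female", "a", "American female – airy, youthful"),
--     ("am_adam",     "male",   "a", "American male – deep, authoritative"),
--     ("am_michael",  "male",   "a", "American male – neutral, newscaster"),
--     ("bf_emma",     "female", "b", "British female – refined, articulate"),
--     ("bf_isabella", "female", "b", "British female – warm, storyteller"),
--     ("bm_george",   "male",   "b", "British male – distinguished, mature"),
--     ("bm_lewis",    "male",   "b", "British male – energetic, contemporary"),
--     ("af",          "female", "a", "American female – default"),
-- ]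
--
-- KOKORO_FEMALE = [v for v in KOKORO_VOICES if v[1] == "female"]
-- KOKORO_MALE   = [v for v in KOKORO_VOICES if v[1] == "male"]
--
-- KOKORO_PREF = {
--     ("female", "confident"):    0,
--     ("female", "warm"):         0,
--     ("female", "enthusiastic"): 2,
--     ("female", "nervous"):      3,
--     ("female", "deadpan"):      1,
--     ("female", "sinister"):     4,
--     ("female", "raspy"):        5,
--     ("male",   "confident"):    0,
--     ("male",   "warm"):         0,
--     ("male",   "enthusiastic"): 1,
--     ("male",   "deadpan"):      1,
--     ("male",   "nervous"):      1,
--     ("male",   "sinister"):     2,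
--     ("male",   "raspy"):        2,
-- }
--
--
-- def _assign_kokoro(gender: str, energy: str, used: set[str]) -> dict:
--     """Pick the best available Kokoro voice for this gender/energy combo."""
--     if gender == "male":
--         pool = KOKORO_MALE
--     elif gender == "female":
--         pool = KOKORO_FEMALE
--     else:
--         pool = KOKORO_VOICES  # neutral: all voices
--
--     pref = KOKORO_PREF.get((gender, energy), 0)
--
--     # Selection by minimum rank instead of ordered scanning: give every candidate
--     # occurrence a numeric rank (preferred pool entry -1, other pool entries their
--     # index, catalogue entries len(pool)+j) and take the available occurrence of
--     # least rank; an empty selection falls back to the catalogue head.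
--     scored = [(-1 if i == pref else i, e) for i, e in enumerate(pool)] \
--            + [(len(pool) + j, e) for j, e in enumerate(KOKORO_VOICES)]
--     _, entry = min((s for s in scored if s[1][0] not in used),
--                    key=lambda s: s[0], default=(0, KOKORO_VOICES[0]))
--
--     return {
--         "type":        "kokoro",
--         "voice_id":    entry[0],
--         "lang_code":   entry[2],
--         "description": entry[3],
--     }
-- ===== Notes on version B (the rewrite author's own statement) =====
-- stated objective: alternative
-- what changed: Replaces A's ordered scanning (an index list with modular lookup, then a second catalogue walk, then a fallback block) by selection-by-minimum: every candidate occurrence gets a numeric rank (preferred pool entry -1, other pool entries their index, catalogue entries len(pool)+j) and B returns min(available occurrences, key=rank) with the catalogue head as min's default; correct because the rank order is exactly A's visiting order and a pool occurrence always outranks its catalogue duplicate.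
import Mathlib
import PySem

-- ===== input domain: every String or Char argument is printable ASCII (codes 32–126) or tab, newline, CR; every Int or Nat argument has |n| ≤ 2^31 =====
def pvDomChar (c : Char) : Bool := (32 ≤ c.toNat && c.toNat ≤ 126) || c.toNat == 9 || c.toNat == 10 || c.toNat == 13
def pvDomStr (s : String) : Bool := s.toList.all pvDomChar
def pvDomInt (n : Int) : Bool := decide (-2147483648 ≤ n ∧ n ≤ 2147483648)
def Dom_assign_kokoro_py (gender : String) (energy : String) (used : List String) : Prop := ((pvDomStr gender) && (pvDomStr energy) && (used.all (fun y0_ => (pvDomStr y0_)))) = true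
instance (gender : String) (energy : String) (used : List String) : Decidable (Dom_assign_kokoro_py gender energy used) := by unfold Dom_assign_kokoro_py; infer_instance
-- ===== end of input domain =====

-- B replaces A's ordered scanning (two loops plus a fallback block) by selection-by-minimum
-- over a ranked candidate list (python min with key and default); objective: alternative.


-- shared module-level constants (KOKORO_VOICES / KOKORO_FEMALE / KOKORO_MALE / KOKORO_PREF)
def pvKokoroVoices : List (String × String × String × String) := [
  ("af_bella",    "female", "a", "American female – warm, clear"),
  ("af_nicole",   "female", "a", "American female – smooth, professional"),
  ("af_sarah",    "female", "a", "American female – friendly, bright"),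
  ("af_sky",      "female", "a", "American female – airy, youthful"),
  ("am_adam",     "male",   "a", "American male – deep, authoritative"),
  ("am_michael",  "male",   "a", "American male – neutral, newscaster"),
  ("bf_emma",     "female", "b", "British female – refined, articulate"),
  ("bf_isabella", "female", "b", "British female – warm, storyteller"),
  ("bm_george",   "male",   "b", "British male – distinguished, mature"),
  ("bm_lewis",    "male",   "b", "British male – energetic, contemporary"),
  ("af",          "female", "a", "American female – default")]

def pvKokoroFemale : List (String × String × String × String) :=
  pvKokoroVoices.filter (fun v => v.2.1 == "female")

def pvKokoroMale : List (String × String × String × String) :=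
  pvKokoroVoices.filter (fun v => v.2.1 == "male")

def pvKokoroPref : PySem.Dict (String × String) Int := PySem.Dict.ofList [
  (("female", "confident"),    0),
  (("female", "warm"),         0),
  (("female", "enthusiastic"), 2),
  (("female", "nervous"),      3),
  (("female", "deadpan"),      1),
  (("female", "sinister"),     4),
  (("female", "raspy"),        5),
  (("male",   "confident"),    0),
  (("male",   "warm"),         0),
  (("male",   "enthusiastic"), 1),
  (("male",   "deadpan"),      1),
  (("male",   "nervous"),      1),
  (("male",   "sinister"),     2),
  (("male",   "raspy"),        2)]

-- ===== PORT A =====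
-- the result dict A builds inline (same four keys, in insertion order)
def pvMakeA (e : String × String × String × String) : List (String × String) :=
  [("type", "kokoro"), ("voice_id", e.1), ("lang_code", e.2.2.1), ("description", e.2.2.2)]

-- A's first loop: 'for idx in order: … pool[idx % len(pool)] …'
def pvLoopA1 (pool : List (String × String × String × String)) (used : List String) :
    List Int → Option (List (String × String))
  | [] => none
  | idx :: rest =>
    match PySem.List.pyGet? pool (PySem.Int.mod idx (pool.length : Int)) with
    | none => none  -- unreachable: every idx fed to this loop has 0 ≤ idx % len < len (pool nonempty)
    | some entry =>
      if used.contains entry.1 then pvLoopA1 pool used rest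
      else some (pvMakeA entry)

-- A's second loop: 'for entry in KOKORO_VOICES: …'
def pvLoopA2 (used : List String) :
    List (String × String × String × String) → Option (List (String × String))
  | [] => none
  | entry :: rest =>
    if used.contains entry.1 then pvLoopA2 used rest
    else some (pvMakeA entry)

def assign_kokoro_py (gender : String) (energy : String) (used : List String) : List (String × String) :=
  let pool := if gender == "male" then pvKokoroMale
              else if gender == "female" then pvKokoroFemale
              else pvKokoroVoices
  let preferredIdx : Int := pvKokoroPref.getD (gender, energy) 0
  let order : List Int :=
    preferredIdx :: (PySem.List.pyRange 0 (pool.length : Int) 1).filter (fun i => i != preferredIdx)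
  match pvLoopA1 pool used order with
  | some r => r
  | none =>
    match pvLoopA2 used pvKokoroVoices with
    | some r => r
    | none =>
      match pvKokoroVoices with  -- KOKORO_VOICES[0]: the literal list is nonempty
      | entry :: _ => pvMakeA entry
      | [] => []

-- ===== PORT B =====
-- B's result-dict builder (the same four keys, built from the selected entry)
def pvMakeB (e : String × String × String × String) : List (String × String) :=
  [("type", "kokoro"), ("voice_id", e.1), ("lang_code", e.2.2.1), ("description", e.2.2.2)]

def assign_kokoro_py_alt (gender : String) (energy : String) (used : List String) : List (String × String) :=
  let pool := if gender == "male" then pvKokoroMale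
              else if gender == "female" then pvKokoroFemale
              else pvKokoroVoices
  let pref : Int := pvKokoroPref.getD (gender, energy) 0
  -- rank every candidate occurrence: preferred pool entry -1, other pool entries their
  -- index, catalogue entries len(pool)+j
  let scored : List (Int × (String × String × String × String)) :=
    (PySem.List.enumerate pool).map (fun ie => (if ie.1 == pref then (-1 : Int) else ie.1, ie.2)) ++
    (PySem.List.enumerate pvKokoroVoices).map (fun je => ((pool.length : Int) + je.1, je.2))
  -- min(available occurrences, key=rank, default=(0, KOKORO_VOICES[0]))
  let best := PySem.List.minD (scored.filter (fun s => !used.contains s.2.1)) (fun s => s.1)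
    ((0 : Int), pvKokoroVoices.getD 0 ("", "", "", ""))
  pvMakeB best.2

-- ===== PRECONDITION & SPEC =====
def Spec_assign_kokoro_py (gender : String) (energy : String) (used : List String) (out : List (String × String)) : Prop := out = assign_kokoro_py_alt gender energy used
instance (gender : String) (energy : String) (used : List String) (out : List (String × String)) : Decidable (Spec_assign_kokoro_py gender energy used out) := by unfold Spec_assign_kokoro_py; infer_instance

-- ===== CLAIM (what is proved, stated in full; the proofs are below) =====
def Claim_equal_assign_kokoro_py : Prop := ∀ (gender : String) (energy : String) (used : List String), Dom_assign_kokoro_py gender energy used → Spec_assign_kokoro_py gender energy used (assign_kokoro_py gender energy used)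

-- ===== LEMMAS AND PROOFS =====

-- the two result-dict builders coincide
theorem pvMakeB_eq (e : String × String × String × String) : pvMakeB e = pvMakeA e := rfl

-- dummy entry used as a (never reached) List.getD default in the proofs
def pvDE : String × String × String × String := ("", "", "", "")

theorem pvPrefItems : pvKokoroPref.items = [
  (("female", "confident"),    0),
  (("female", "warm"),         0),
  (("female", "enthusiastic"), 2),
  (("female", "nervous"),      3),
  (("female", "deadpan"),      1),
  (("female", "sinister"),     4),
  (("female", "raspy"),        5),
  (("male",   "confident"),    0),
  (("male",   "warm"),         0),
  (("male",   "enthusiastic"), 1),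
  (("male",   "deadpan"),      1),
  (("male",   "nervous"),      1),
  (("male",   "sinister"),     2),
  (("male",   "raspy"),        2)] := by decide

theorem pvPref_male (energy : String) :
    0 ≤ pvKokoroPref.getD ("male", energy) 0 ∧ pvKokoroPref.getD ("male", energy) 0 < 4 := by
  simp only [PySem.Dict.getD, PySem.Dict.get?, pvPrefItems, List.find?]
  repeat' split
  all_goals simp_all

theorem pvPref_female (energy : String) :
    0 ≤ pvKokoroPref.getD ("female", energy) 0 ∧ pvKokoroPref.getD ("female", energy) 0 < 7 := by
  simp only [PySem.Dict.getD, PySem.Dict.get?, pvPrefItems, List.find?]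
  repeat' split
  all_goals simp_all

theorem pvPref_other (gender energy : String) (hm : ¬ gender = "male") (hf : ¬ gender = "female") :
    pvKokoroPref.getD (gender, energy) 0 = 0 := by
  simp only [PySem.Dict.getD, PySem.Dict.get?, pvPrefItems, List.find?]
  repeat' split
  all_goals try rfl
  all_goals rename_i h
  all_goals rw [beq_iff_eq, Prod.mk.injEq] at h
  all_goals exact absurd h.1.symm (by first | exact hm | exact hf)

-- A's catalogue loop is a find-first
theorem pvLoopA2_eq (used : List String) (es : List (String × String × String × String)) :
    pvLoopA2 used es = (es.find? (fun e => !used.contains e.1)).map pvMakeA := by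
  induction es with
  | nil => rfl
  | cons e rest ih =>
    simp only [pvLoopA2, List.find?]
    cases h : used.contains e.1 <;> simp [ih]

-- A's index loop is a find-first over the looked-up entries (all indices in range)
theorem pvLoopA1_eq (pool : List (String × String × String × String)) (used : List String)
    (idxs : List Int) (h : ∀ i ∈ idxs, 0 ≤ i ∧ i < (pool.length : Int)) :
    pvLoopA1 pool used idxs =
      ((idxs.map (fun i => pool.getD i.toNat pvDE)).find? (fun e => !used.contains e.1)).map pvMakeA := by
  induction idxs with
  | nil => rfl
  | cons i rest ih =>
    obtain ⟨h0, h1⟩ := h i (List.mem_cons_self ..)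
    have hpos : (0 : Int) < pool.length := lt_of_le_of_lt h0 h1
    have hmod : PySem.Int.mod i (pool.length : Int) = i := by
      rw [PySem.Int.mod_eq_emod_of_pos hpos, Int.emod_eq_of_lt h0 h1]
    have hlt : i.toNat < pool.length := by omega
    have hget : PySem.List.pyGet? pool i = some pool[i.toNat] :=
      PySem.List.pyGet?_eq_some_getElem pool h0 h1
    have hgetD : pool.getD i.toNat pvDE = pool[i.toNat] := List.getD_eq_getElem pool pvDE hlt
    simp only [pvLoopA1, hmod, hget, List.map_cons, List.find?, hgetD]
    cases hc : used.contains pool[i.toNat].1 <;>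
      simp [ih (fun j hj => h j (List.mem_cons_of_mem _ hj))]

theorem pvMapGetDRangeDrop {α : Type} (l : List α) (d : α) (a : Nat) :
    (List.range (l.length - a)).map (fun k => l.getD (a + k) d) = l.drop a := by
  apply List.ext_getElem
  · simp
  · intro k hk hk'
    simp only [List.getElem_map, List.getElem_range, List.getElem_drop]
    have : a + k < l.length := by simp at hk; omega
    rw [List.getD_eq_getElem l d this]

theorem pvMapGetDRangeTake {α : Type} (l : List α) (d : α) (p : Nat) (hp : p ≤ l.length) :
    (List.range p).map (fun k => l.getD k d) = l.take p := by
  apply List.ext_getElem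
  · simp; omega
  · intro k hk hk'
    simp only [List.getElem_map, List.getElem_range, List.getElem_take]
    have : k < l.length := by simp at hk; omega
    rw [List.getD_eq_getElem l d this]

-- walking all indices except p, in order, visits the pool minus its p-th entry
theorem pvFilterRangeMapGetD {α : Type} (l : List α) (d : α) (p : Nat) (hp : p < l.length) :
    ((List.range l.length).filter (fun k => !(k == p))).map (fun k => l.getD k d)
      = l.take p ++ l.drop (p + 1) := by
  have h1 : List.range l.length
      = (List.range p ++ [p]) ++ (List.range (l.length - (p + 1))).map (fun x => (p + 1) + x) := by
    rw [← List.range_succ, ← List.range_add]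
    congr 1
    omega
  rw [h1, List.filter_append, List.filter_append]
  have f1 : (List.range p).filter (fun k => !(k == p)) = List.range p :=
    List.filter_eq_self.mpr (by intro a ha; simp [List.mem_range] at ha ⊢; omega)
  have f2 : ([p].filter (fun k => !(k == p))) = [] := by simp
  have f3 : ((List.range (l.length - (p + 1))).map (fun x => (p + 1) + x)).filter (fun k => !(k == p))
      = (List.range (l.length - (p + 1))).map (fun x => (p + 1) + x) :=
    List.filter_eq_self.mpr (by
      intro a ha
      simp only [List.mem_map, List.mem_range] at ha
      obtain ⟨x, _, rfl⟩ := ha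
      simp; omega)
  rw [f1, f2, f3, List.append_nil, List.map_append, List.map_map]
  rw [pvMapGetDRangeTake l d p (le_of_lt hp)]
  congr 1
  rw [← pvMapGetDRangeDrop l d (p + 1)]
  rfl

-- shifting all the counters of an enumeration = enumerating from a shifted start
theorem pvEnumShift {α : Type} (xs : List α) (s t : Int) :
    (PySem.List.enumerate xs t).map (fun x => (s + x.1, x.2)) = PySem.List.enumerate xs (s + t) := by
  induction xs generalizing t with
  | nil => simp [PySem.List.enumerate_nil]
  | cons x rest ih =>
    rw [PySem.List.enumerate_cons, PySem.List.enumerate_cons, List.map_cons, ih (t + 1)]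
    have : s + (t + 1) = s + t + 1 := by ring
    rw [this]

-- every counter of an enumeration lies in [s, s + len)
theorem pvEnumKeyBounds {α : Type} (xs : List α) (s : Int) :
    ∀ x ∈ PySem.List.enumerate xs s, s ≤ x.1 ∧ x.1 < s + xs.length := by
  intro x hx
  obtain ⟨k, hk, rfl⟩ := (PySem.List.mem_enumerate_iff _ _ _).mp hx
  refine ⟨by simp, ?_⟩
  simp
  omega

-- python min with key returns the element every other one strictly outranks
theorem pvMin_eq_of_unique {α : Type} (xs : List (Int × α)) (m : Int × α) (hm : m ∈ xs)
    (h : ∀ x ∈ xs, x.1 ≤ m.1 → x = m) :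
    PySem.List.min? xs (fun s => s.1) = some m := by
  cases h' : PySem.List.min? xs (fun s => s.1) with
  | none =>
    rw [PySem.List.min?_eq_none_iff] at h'
    subst h'
    cases hm
  | some r =>
    have hr := PySem.List.min?_mem h'
    have hle := PySem.List.min?_isMin h' m hm
    exact congrArg some (h r hr hle)

-- python min with key over a strictly key-increasing list is its head
theorem pvMin_sorted {α : Type} (xs : List (Int × α))
    (hpw : xs.Pairwise (fun a b => a.1 < b.1)) :
    PySem.List.min? xs (fun s => s.1) = xs.head? := by
  cases xs with
  | nil => rfl
  | cons x rest =>
    rw [List.head?_cons]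
    apply pvMin_eq_of_unique _ x (List.mem_cons_self ..)
    intro y hy hle
    rcases List.mem_cons.mp hy with rfl | hy
    · rfl
    · exact absurd hle (not_le.mpr ((List.pairwise_cons.mp hpw).1 y hy))

-- the common core: A's ordered two-loop scan + fallback equal B's min-by-rank selection,
-- for any pool and in-range pref
theorem pvCore (pool : List (String × String × String × String)) (used : List String) (pref : Int)
    (h0 : 0 ≤ pref) (h1 : pref < (pool.length : Int)) :
    (match pvLoopA1 pool used
        (pref :: (PySem.List.pyRange 0 (pool.length : Int) 1).filter (fun i => i != pref)) with
     | some r => r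
     | none =>
       match pvLoopA2 used pvKokoroVoices with
       | some r => r
       | none => match pvKokoroVoices with | entry :: _ => pvMakeA entry | [] => []) =
    pvMakeB (PySem.List.minD
      (List.filter (fun s => !used.contains s.2.1)
        ((PySem.List.enumerate pool).map (fun ie => (if ie.1 == pref then (-1 : Int) else ie.1, ie.2)) ++
         (PySem.List.enumerate pvKokoroVoices).map (fun je => ((pool.length : Int) + je.1, je.2))))
      (fun s => s.1) ((0 : Int), pvKokoroVoices.getD 0 ("", "", "", ""))).2 := by
  obtain ⟨p, rfl⟩ : ∃ p : Nat, pref = (p : Int) := ⟨pref.toNat, (Int.toNat_of_nonneg h0).symm⟩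
  have hp : p < pool.length := by exact_mod_cast h1
  -- A's loops as find-first
  have hbounds : ∀ i ∈ ((p : Int) ::
      (PySem.List.pyRange 0 (pool.length : Int) 1).filter (fun i => i != (p : Int))),
      0 ≤ i ∧ i < (pool.length : Int) := by
    intro i hi
    rcases List.mem_cons.mp hi with rfl | hi
    · exact ⟨by positivity, h1⟩
    · exact PySem.List.mem_pyRange_one.mp (List.mem_of_mem_filter hi)
  rw [pvLoopA1_eq pool used _ hbounds, pvLoopA2_eq]
  -- compute the entry list A's first loop walks
  have horder : (((p : Int) ::
      (PySem.List.pyRange 0 (pool.length : Int) 1).filter (fun i => i != (p : Int))).map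
        (fun i => pool.getD i.toNat pvDE))
      = pool[p] :: (pool.take p ++ pool.drop (p + 1)) := by
    rw [List.map_cons]
    congr 1
    · simp [List.getElem?_eq_getElem hp]
    · rw [PySem.List.pyRange_zero_nat, List.filter_map, List.map_map]
      have hpred : ∀ k ∈ List.range pool.length,
          (((fun i => i != (p : Int)) ∘ (fun k : Nat => (k : Int))) k) = !(k == p) := by
        intro k _
        rcases eq_or_ne k p with rfl | h
        · simp
        · have hik : ((k : Int) != (p : Int)) = true := by
            simp [bne_iff_ne]; exact_mod_cast h
          have hkp : (k == p) = false := by simp [h]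
          show ((k : Int) != (p : Int)) = !(k == p)
          rw [hik, hkp]
          rfl
      rw [List.filter_congr hpred]
      have hfun : ((fun i : Int => pool.getD i.toNat pvDE) ∘ (fun k : Nat => (k : Int)))
          = fun k : Nat => pool.getD k pvDE := by
        funext k; simp
      rw [hfun, pvFilterRangeMapGetD pool pvDE p hp]
  rw [horder]
  -- B's ranked candidate list, decomposed around the preferred entry
  have hlentake : (pool.take p).length = p := by simp [List.length_take]; omega
  have hM1 : (PySem.List.enumerate pool).map
        (fun ie => (if ie.1 == (p : Int) then (-1 : Int) else ie.1, ie.2))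
      = PySem.List.enumerate (pool.take p) 0 ++
        ((-1 : Int), pool[p]) :: PySem.List.enumerate (pool.drop (p + 1)) ((p : Int) + 1) := by
    have hsplit : pool = pool.take p ++ pool[p] :: pool.drop (p + 1) := by
      conv_lhs => rw [← List.take_append_drop p pool, List.drop_eq_getElem_cons hp]
    conv_lhs => rw [hsplit]
    rw [PySem.List.enumerate_append, List.map_append, PySem.List.enumerate_cons, List.map_cons]
    have hstart : (0 : Int) + (pool.take p).length = (p : Int) := by
      rw [hlentake]; ring
    rw [hstart]
    congr 1
    · -- take part: keys k < p, never the preferred index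
      have : ∀ x ∈ PySem.List.enumerate (pool.take p) (0 : Int),
          ((if x.1 == (p : Int) then (-1 : Int) else x.1, x.2)) = x := by
        intro x hx
        obtain ⟨hlo, hhi⟩ := pvEnumKeyBounds _ _ x hx
        rw [hlentake] at hhi
        have : (x.1 == (p : Int)) = false := by
          simp only [beq_eq_false_iff_ne, ne_eq]
          omega
        rw [this]
        simp
      rw [List.map_congr_left this]
      simp
    · -- preferred entry gets rank -1; drop part: keys > p
      congr 1
      · simp
      · have : ∀ x ∈ PySem.List.enumerate (pool.drop (p + 1)) ((p : Int) + 1),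
            ((if x.1 == (p : Int) then (-1 : Int) else x.1, x.2)) = x := by
          intro x hx
          obtain ⟨hlo, hhi⟩ := pvEnumKeyBounds _ _ x hx
          have : (x.1 == (p : Int)) = false := by
            simp only [beq_eq_false_iff_ne, ne_eq]
            omega
          rw [this]
          simp
        rw [List.map_congr_left this]
        simp
  have hM2 : (PySem.List.enumerate pvKokoroVoices).map
        (fun je => ((pool.length : Int) + je.1, je.2))
      = PySem.List.enumerate pvKokoroVoices (pool.length : Int) := by
    have := pvEnumShift pvKokoroVoices (pool.length : Int) 0
    rw [add_zero] at this
    exact this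
  rw [hM1, hM2]
  -- name the three all-nonnegative-rank segments
  set A1 := PySem.List.enumerate (pool.take p) (0 : Int) with hA1
  set A2 := PySem.List.enumerate (pool.drop (p + 1)) ((p : Int) + 1) with hA2
  set C := PySem.List.enumerate pvKokoroVoices (pool.length : Int) with hC
  have hA1k : ∀ x ∈ A1, 0 ≤ x.1 ∧ x.1 < (p : Int) := by
    intro x hx
    obtain ⟨hlo, hhi⟩ := pvEnumKeyBounds _ _ x hx
    rw [hlentake] at hhi
    omega
  have hA2k : ∀ x ∈ A2, (p : Int) + 1 ≤ x.1 ∧ x.1 < (pool.length : Int) := by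
    intro x hx
    obtain ⟨hlo, hhi⟩ := pvEnumKeyBounds _ _ x hx
    have : (pool.drop (p + 1)).length = pool.length - (p + 1) := by simp
    rw [this] at hhi
    constructor
    · exact hlo
    · have : ((pool.length - (p + 1) : Nat) : Int) ≤ (pool.length : Int) - ((p : Int) + 1) := by
        omega
      omega
  have hCk : ∀ x ∈ C, (pool.length : Int) ≤ x.1 := fun x hx => (pvEnumKeyBounds _ _ x hx).1
  -- case on availability of the preferred entry
  cases hc : used.contains pool[p].1 with
  | false =>
    -- A: the head of the scan is taken at once
    have hfind : ((pool[p] :: (pool.take p ++ pool.drop (p + 1))).find?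
        (fun e => !used.contains e.1)) = some pool[p] :=
      List.find?_cons_of_pos (by simpa using hc)
    rw [hfind]
    -- B: (-1, pool[p]) is the unique rank-minimal available candidate
    have hmemS : ((-1 : Int), pool[p]) ∈ (A1 ++ ((-1 : Int), pool[p]) :: A2) ++ C := by
      simp
    have hmemF : ((-1 : Int), pool[p]) ∈
        (((A1 ++ ((-1 : Int), pool[p]) :: A2) ++ C).filter (fun s => !used.contains s.2.1)) := by
      rw [List.mem_filter]
      exact ⟨hmemS, by simpa using hc⟩
    have huniq : ∀ x ∈ (((A1 ++ ((-1 : Int), pool[p]) :: A2) ++ C).filter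
        (fun s => !used.contains s.2.1)), x.1 ≤ (-1 : Int) → x = ((-1 : Int), pool[p]) := by
      intro x hx hle
      have hxs := List.mem_of_mem_filter hx
      rcases List.mem_append.mp hxs with hxs | hxs
      · rcases List.mem_append.mp hxs with hxs | hxs
        · exact absurd hle (not_le.mpr (by have := (hA1k x hxs).1; omega))
        · rcases List.mem_cons.mp hxs with rfl | hxs
          · rfl
          · exact absurd hle (not_le.mpr (by have := (hA2k x hxs).1; omega))
      · exact absurd hle (not_le.mpr (by have := hCk x hxs; omega))
    have hmin := pvMin_eq_of_unique _ _ hmemF huniq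
    rw [PySem.List.minD, hmin]
    simp [pvMakeB_eq]
  | true =>
    -- A: the head of the scan is skipped
    have hskip : ((pool[p] :: (pool.take p ++ pool.drop (p + 1))).find?
        (fun e => !used.contains e.1))
        = ((pool.take p ++ pool.drop (p + 1)).find? (fun e => !used.contains e.1)) :=
      List.find?_cons_of_neg (by simpa using hc)
    rw [hskip]
    -- B: the preferred entry is filtered out, the rest is strictly rank-increasing
    have hfilter : (((A1 ++ ((-1 : Int), pool[p]) :: A2) ++ C).filter
        (fun s => !used.contains s.2.1))
        = ((A1 ++ A2 ++ C).filter (fun s => !used.contains s.2.1)) := by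
      simp only [List.filter_append, List.filter_cons]
      rw [hc]
      simp
    rw [hfilter]
    have hpw : (A1 ++ A2 ++ C).Pairwise (fun a b => a.1 < b.1) := by
      rw [List.pairwise_append, List.pairwise_append]
      refine ⟨⟨PySem.List.pairwise_lt_enumerate .., PySem.List.pairwise_lt_enumerate ..,
        fun a ha b hb => ?_⟩, PySem.List.pairwise_lt_enumerate .., fun a ha b hb => ?_⟩
      · have h1 := (hA1k a ha).2
        have h2 := (hA2k b hb).1
        omega
      · have h2 := hCk b hb
        rcases List.mem_append.mp ha with ha | ha
        · have h1 := (hA1k a ha).2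
          omega
        · have h1 := (hA2k a ha).2
          omega
    have hmin := pvMin_sorted _ (hpw.filter (fun s => !used.contains s.2.1))
    rw [PySem.List.minD, hmin]
    -- both remaining scans are the head of the same filtered list
    have hsnd : (A1 ++ A2 ++ C).map Prod.snd
        = (pool.take p ++ pool.drop (p + 1)) ++ pvKokoroVoices := by
      simp only [List.map_append, hA1, hA2, hC, PySem.List.map_snd_enumerate]
    have hA : (((pool.take p ++ pool.drop (p + 1)).find? (fun e => !used.contains e.1)).or
          (pvKokoroVoices.find? (fun e => !used.contains e.1)))
        = (((A1 ++ A2 ++ C).filter (fun s => !used.contains s.2.1)).head?).map Prod.snd := by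
      rw [List.head?_filter, ← List.find?_append, ← hsnd, List.find?_map]
      rfl
    cases hh : (((A1 ++ A2 ++ C).filter (fun s => !used.contains s.2.1)).head?) with
    | none =>
      rw [hh, Option.map_none] at hA
      rcases ho : ((pool.take p ++ pool.drop (p + 1)).find? (fun e => !used.contains e.1)) with _ | e
      · rw [ho, Option.none_or] at hA
        rw [ho, hA]
        rfl
      · rw [ho] at hA
        simp at hA
    | some f =>
      rw [hh] at hA
      rcases ho : ((pool.take p ++ pool.drop (p + 1)).find? (fun e => !used.contains e.1)) with _ | e
      · rw [ho, Option.none_or] at hA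
        rw [ho, hA]
        simp [pvMakeB_eq]
      · rw [ho, Option.some_or] at hA
        simp only [Option.map_some, Option.some.injEq] at hA
        rw [ho]
        simp [hA, pvMakeB_eq]
-- ===== VERDICT (by name: the statement is the Claim_ definition above) =====
theorem assign_kokoro_py_spec : Claim_equal_assign_kokoro_py := by
  intro gender energy used _
  unfold Spec_assign_kokoro_py
  by_cases hm : gender = "male"
  · simp only [assign_kokoro_py, assign_kokoro_py_alt, hm]
    simp only [beq_self_eq_true, if_true]
    exact pvCore pvKokoroMale used _ (pvPref_male energy).1
      (by have h2 := (pvPref_male energy).2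
          have hlen : ((pvKokoroMale.length : Int)) = 4 := by decide
          omega)
  · by_cases hf : gender = "female"
    · simp only [assign_kokoro_py, assign_kokoro_py_alt, hf]
      simp only [beq_self_eq_true, if_true]
      exact pvCore pvKokoroFemale used _ (pvPref_female energy).1
        (by have h2 := (pvPref_female energy).2
            have hlen : ((pvKokoroFemale.length : Int)) = 7 := by decide
            omega)
    · simp only [assign_kokoro_py, assign_kokoro_py_alt]
      have hm' : (gender == "male") = false := by simp [hm]
      have hf' : (gender == "female") = false := by simp [hf]
      simp only [hm', hf']
      rw [pvPref_other gender energy hm hf]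
      exact pvCore pvKokoroVoices used 0 le_rfl
        (by have hlen : ((pvKokoroVoices.length : Int)) = 11 := by decide
            omega)
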